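-- pv_equiv track=rewrite | github.com/kelcey-caboff/sars-report | index_emails.py | _canonical_label
-- ===== SOURCE A (Python) =====
-- from typing import List, Dict, Any, Iterable, Optional, Union
--
-- def _canonical_label(members: List[str]) -> str:
--     names = [m for m in members if "@" not in m]
--     emails = [m for m in members if "@" in m]
--     if names:
--         names_sorted = sorted(names, key=lambda s: (-(" " in s or "," in s), -len(s), s.lower()))
--         return names_sorted[0]
--     if emails:
--         return sorted(emails)[0]
--     return sorted(members, key=lambda s: (-len(s), s.lower()))[0]
-- ===== SOURCE B (Python) =====
-- def _canonical_label(members):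
--     # Single fused pass: track the best non-email (by A's tier-1 key) and the best
--     # email simultaneously; no partition lists, no sorting.  Any name beats any
--     # email; the final fallback tier of A is unreachable for nonempty input.
--     best_name = None   # (key, string), first-wins on ties via strict <
--     best_email = None
--     for m in members:
--         if "@" in m:
--             if best_email is None or m < best_email:
--                 best_email = m
--         else:
--             k = (-(" " in m or "," in m), -len(m), m.lower())
--             if best_name is None or k < best_name[0]:
--                 best_name = (k, m)
--     if best_name is not None:
--         return best_name[1]
--     if best_email is not None:
--         return best_email
--     return members[0]  # only reachable when members == [] (outside Pre_): IndexError
-- ===== Notes on version B (the rewrite author's own statement) =====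
-- stated objective: faster
-- what changed: A builds two filtered lists and fully sorts one of them to take its head; B makes one fused pass over members maintaining two accumulators (best non-email by A's key, best email), never materialising the partitions or sorting, and drops A's unreachable final-fallback sort.
import Mathlib
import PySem

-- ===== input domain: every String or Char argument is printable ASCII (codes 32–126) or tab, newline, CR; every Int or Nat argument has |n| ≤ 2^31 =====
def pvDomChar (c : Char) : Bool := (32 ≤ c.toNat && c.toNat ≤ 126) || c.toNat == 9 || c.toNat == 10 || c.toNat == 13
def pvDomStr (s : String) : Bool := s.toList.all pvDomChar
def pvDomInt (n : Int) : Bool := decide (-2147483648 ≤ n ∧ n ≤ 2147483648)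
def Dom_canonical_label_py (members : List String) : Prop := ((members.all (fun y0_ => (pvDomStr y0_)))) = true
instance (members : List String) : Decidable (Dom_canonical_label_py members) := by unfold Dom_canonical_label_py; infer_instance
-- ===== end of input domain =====

-- B replaces A's two filter passes plus sort-and-take-head by ONE fused scan over
-- members keeping two accumulators (best non-email under A's key, best email);
-- no partition lists, no sort.  Return value only; neither version mutates its input.

-- ===== PORT A =====
-- Python's tuple keys are compared LEXICOGRAPHICALLY; Mathlib's '<' on products is the
-- pointwise order, so the tuple comparison is written out explicitly (exact on this domain).
def pvLex3 : Int × Int × String → Int × Int × String → Bool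
  | (a1, a2, a3), (b1, b2, b3) =>
    if a1 < b1 then true else if b1 < a1 then false
    else if a2 < b2 then true else if b2 < a2 then false
    else decide (a3 < b3)

def pvLex2 : Int × String → Int × String → Bool
  | (a1, a2), (b1, b2) =>
    if a1 < b1 then true else if b1 < a1 then false else decide (a2 < b2)

-- key=lambda s: (-(" " in s or "," in s), -len(s), s.lower())
def pvKeyNames (s : String) : Int × Int × String :=
  ((if PySem.Str.isIn " " s || PySem.Str.isIn "," s then -1 else 0), -(PySem.Str.len s), PySem.Str.lower s)

-- key=lambda s: (-len(s), s.lower())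
def pvKeyFall (s : String) : Int × String := (-(PySem.Str.len s), PySem.Str.lower s)

def pvLtNames (a b : String) : Bool := pvLex3 (pvKeyNames a) (pvKeyNames b)
def pvLtFall (a b : String) : Bool := pvLex2 (pvKeyFall a) (pvKeyFall b)

-- sorted(xs, key=k) is exactly this foldl of insertBy (PySem.List.sorted_eq_foldl_insertBy);
-- the '[0]' indexing is total here only under Pre_ (members ≠ []), so .headD "" stands for it.
def canonical_label_py (members : List String) : String :=
  let names := members.filter (fun m => !(PySem.Str.isIn "@" m))
  let emails := members.filter (fun m => PySem.Str.isIn "@" m)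
  if names ≠ [] then
    (names.foldl (fun acc x => PySem.List.insertBy pvLtNames x acc) []).headD ""
  else if emails ≠ [] then
    (PySem.List.sorted emails (fun x => x) false).headD ""
  else
    (members.foldl (fun acc x => PySem.List.insertBy pvLtFall x acc) []).headD ""

-- ===== PORT B =====
-- the loop body's two accumulator updates, as in Source B: first-wins on ties via strict <
def pvStepN (o : Option ((Int × Int × String) × String)) (m : String) :
    Option ((Int × Int × String) × String) :=
  match o with
  | none => some (pvKeyNames m, m)
  | some (kb, b) => if pvLex3 (pvKeyNames m) kb then some (pvKeyNames m, m) else some (kb, b)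

def pvStepE (o : Option String) (m : String) : Option String :=
  match o with
  | none => some m
  | some e => if m < e then some m else some e

def canonical_label_py_alt (members : List String) : String :=
  let st := members.foldl
    (fun (st : Option ((Int × Int × String) × String) × Option String) m =>
      if PySem.Str.isIn "@" m then (st.1, pvStepE st.2 m) else (pvStepN st.1 m, st.2))
    (none, none)
  match st.1 with
  | some (_, n) => n
  | none =>
    match st.2 with
    | some e => e
    | none => (PySem.List.pyGet? members 0).getD ""   -- members[0]; outside Pre_ (IndexError)

-- ===== PRECONDITION & SPEC =====
-- Pre_ excludes only members = [], where A raises IndexError (and B too, via members[0]).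
def Pre_canonical_label_py (members : List String) : Prop := members ≠ []
instance (members : List String) : Decidable (Pre_canonical_label_py members) := by
  unfold Pre_canonical_label_py; infer_instance

def pvWitness_canonical_label_py : List String := (["Ada Lovelace", "ada@x.org"])

def Spec_canonical_label_py (members : List String) (out : String) : Prop := out = canonical_label_py_alt members
instance (members : List String) (out : String) : Decidable (Spec_canonical_label_py members out) := by unfold Spec_canonical_label_py; infer_instance

-- ===== CLAIM (what is proved, stated in full; the proofs are below) =====
def Claim_equal_canonical_label_py : Prop := ∀ (members : List String), Dom_canonical_label_py members → Pre_canonical_label_py members → Spec_canonical_label_py members (canonical_label_py members)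

-- ===== LEMMAS AND PROOFS =====

-- head of an insertion sort started from a nonempty accumulator = the min-scan over the
-- remaining elements started from the accumulator's head.
theorem pv_headD_foldl_insertBy {α : Type} (lt : α → α → Bool) (d : α) :
    ∀ (xs : List α) (h0 : α) (t : List α),
      ((xs.foldl (fun acc y => PySem.List.insertBy lt y acc) (h0 :: t)).headD d)
        = xs.foldl (fun best y => if lt y best then y else best) h0 := by
  intro xs
  induction xs with
  | nil => intro h0 t; rfl
  | cons x xs ih =>
    intro h0 t
    simp only [List.foldl_cons, PySem.List.insertBy]
    by_cases h : lt x h0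
    · simp only [h, if_true]
      simpa using ih x (h0 :: t)
    · simp only [h]
      simpa using ih h0 (PySem.List.insertBy lt x t)

-- B's name accumulator, once set, is the min-scan of the remaining names (key kept in sync).
theorem pv_foldN (xs : List String) :
    ∀ n : String, xs.foldl pvStepN (some (pvKeyNames n, n))
      = some (pvKeyNames (xs.foldl (fun best y => if pvLtNames y best then y else best) n),
              xs.foldl (fun best y => if pvLtNames y best then y else best) n) := by
  induction xs with
  | nil => intro n; rfl
  | cons x xs ih =>
    intro n
    simp only [List.foldl_cons, pvStepN, pvLtNames]
    by_cases h : pvLex3 (pvKeyNames x) (pvKeyNames n)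
    · simp only [h, if_true]; exact ih x
    · simp only [h, if_false, Bool.false_eq_true]; exact ih n

-- B's email accumulator, once set, is the min-scan of the remaining emails.
theorem pv_foldE (xs : List String) :
    ∀ e : String, xs.foldl pvStepE (some e)
      = some (xs.foldl (fun best y => if decide (y < best) = true then y else best) e) := by
  induction xs with
  | nil => intro e; rfl
  | cons x xs ih =>
    intro e
    simp only [List.foldl_cons, pvStepE]
    by_cases h : x < e
    · rw [if_pos h, if_pos (by simp [h])]; exact ih x
    · rw [if_neg h, if_neg (by simp [h])]; exact ih e

-- B's fused single pass factors into the two per-partition folds over A's filters.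
theorem pv_fused (xs : List String) :
    ∀ (on_ : Option ((Int × Int × String) × String)) (oe : Option String),
      xs.foldl
        (fun (st : Option ((Int × Int × String) × String) × Option String) m =>
          if PySem.Str.isIn "@" m then (st.1, pvStepE st.2 m) else (pvStepN st.1 m, st.2))
        (on_, oe)
      = ((xs.filter (fun m => !(PySem.Str.isIn "@" m))).foldl pvStepN on_,
         (xs.filter (fun m => PySem.Str.isIn "@" m)).foldl pvStepE oe) := by
  induction xs with
  | nil => intro on_ oe; rfl
  | cons x xs ih =>
    intro on_ oe
    by_cases h : PySem.Str.isIn "@" x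
    · simp only [List.foldl_cons, List.filter_cons, h, if_true, Bool.not_true,
        Bool.false_eq_true, if_false, List.foldl_cons]
      exact ih on_ (pvStepE oe x)
    · have h' : PySem.Str.isIn "@" x = false := eq_false_of_ne_true h
      simp only [List.foldl_cons, List.filter_cons, h', Bool.false_eq_true, if_false,
        Bool.not_false, if_true, List.foldl_cons]
      exact ih (pvStepN on_ x) oe

theorem canonical_label_py_spec : Claim_equal_canonical_label_py := by
  unfold Claim_equal_canonical_label_py
  intro members _hdom hpre
  unfold Spec_canonical_label_py canonical_label_py canonical_label_py_alt
  simp only [pv_fused]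
  cases hn : members.filter (fun m => !(PySem.Str.isIn "@" m)) with
  | cons n ns =>
    simp only [ne_eq, reduceCtorEq, not_false_iff, if_true, List.foldl_cons, pvStepN,
      PySem.List.insertBy]
    rw [pv_headD_foldl_insertBy pvLtNames "" ns n [], pv_foldN]
  | nil =>
    cases he : members.filter (fun m => PySem.Str.isIn "@" m) with
    | cons e es =>
      simp only [ne_eq, not_true_eq_false, if_false, reduceCtorEq, not_false_iff, if_true,
        PySem.List.sorted_eq_foldl_insertBy, List.foldl_cons, PySem.List.insertBy,
        List.foldl_nil, pvStepE]
      rw [pv_headD_foldl_insertBy (fun a b => decide ((fun x => x) a < (fun x => x) b)) "" es e [],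
        pv_foldE]
    | nil =>
      exfalso
      cases hm : members with
      | nil => exact hpre hm
      | cons m ms =>
        by_cases h : PySem.Str.isIn "@" m
        · have : m ∈ members.filter (fun m => PySem.Str.isIn "@" m) := by
            rw [hm]; exact List.mem_filter.mpr ⟨List.mem_cons_self, h⟩
          rw [he] at this; exact (List.not_mem_nil) this
        · have h' : PySem.Str.isIn "@" m = false := eq_false_of_ne_true h
          have : m ∈ members.filter (fun m => !(PySem.Str.isIn "@" m)) := by
            rw [hm]; exact List.mem_filter.mpr ⟨List.mem_cons_self, by rw [h']; rfl⟩
          rw [hn] at this; exact (List.not_mem_nil) this
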